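-- pv_equiv track=rewrite | github.com/karlzurloye/Coding-Portfolio | Python/align:/epron-jpron-alignment-script.py | alignment_dfs
-- ===== SOURCE A (Python) =====
-- import copy
--
-- def alignment_dfs(english,japanese,index,alignment,alignment_list):
--     e_len = len(english)
--     j_len = len(japanese)
--     if j_len == 0:
--         alignment_list.append(copy.copy(alignment))
--         return alignment_list
--     if e_len <= j_len:
--         alignment.append(index)
--         alignment_list = alignment_dfs(english,japanese[1:],index,alignment,alignment_list)
--         alignment.pop(-1)
--     if e_len > 1:
--         alignment.append(index+1)
--         alignment_list = alignment_dfs(english[1:],japanese[1:],index+1,alignment,alignment_list)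
--         alignment.pop(-1)
--     return alignment_list
-- ===== SOURCE B (Python) =====
-- def alignment_dfs(english, japanese, index, alignment, alignment_list):
--     # Iterative DFS with an explicit stack of frames; only the LENGTHS of the
--     # two sequences matter, so a frame keeps (e_len, j_len, index, snapshot).
--     # Note: like A, this appends results into the passed-in alignment_list
--     # object; unlike A it never mutates `alignment` (it copies it).
--     stack = [(len(english), len(japanese), index, list(alignment))]
--     while stack:
--         e, j, idx, align = stack.pop()
--         if j == 0:
--             alignment_list.append(align)
--             continue
--         if e > 1:
--             stack.append((e - 1, j - 1, idx + 1, align + [idx + 1]))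
--         if e <= j:
--             stack.append((e, j - 1, idx, align + [idx]))
--     return alignment_list
-- ===== Notes on version B (the rewrite author's own statement) =====
-- stated objective: alternative
-- what changed: The recursive DFS is replaced by an iterative loop over an explicit stack of (e_len, j_len, index, alignment-snapshot) frames; since A only inspects the two lists through their lengths and tails, B keeps just the lengths in each frame and never mutates the alignment, pushing children so that pops reproduce A's preorder.
import Mathlib
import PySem

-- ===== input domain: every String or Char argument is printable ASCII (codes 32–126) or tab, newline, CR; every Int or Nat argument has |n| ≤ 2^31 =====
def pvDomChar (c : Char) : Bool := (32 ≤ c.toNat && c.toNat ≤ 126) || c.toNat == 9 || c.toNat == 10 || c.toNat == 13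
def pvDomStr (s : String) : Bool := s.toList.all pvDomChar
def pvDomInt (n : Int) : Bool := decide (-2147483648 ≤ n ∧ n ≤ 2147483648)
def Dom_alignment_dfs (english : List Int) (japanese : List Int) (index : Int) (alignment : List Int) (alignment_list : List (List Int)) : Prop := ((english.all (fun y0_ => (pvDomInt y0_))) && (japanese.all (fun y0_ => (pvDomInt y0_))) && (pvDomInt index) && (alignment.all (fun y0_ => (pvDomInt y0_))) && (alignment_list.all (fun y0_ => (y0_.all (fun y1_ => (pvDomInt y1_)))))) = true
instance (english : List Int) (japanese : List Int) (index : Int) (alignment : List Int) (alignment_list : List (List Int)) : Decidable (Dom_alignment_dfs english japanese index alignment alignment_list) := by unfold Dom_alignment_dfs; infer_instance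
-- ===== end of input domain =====

-- ===== PORT A =====
-- B replaces the recursive DFS by an iterative explicit-stack loop over (length, length, index, snapshot) frames (objective: alternative decomposition).
-- Side effects: equivalence is about the RETURN value only — Python A mutates `alignment` (append/pop, net unchanged) and appends into `alignment_list`.
def alignment_dfs (english : List Int) (japanese : List Int) (index : Int) (alignment : List Int) (alignment_list : List (List Int)) : List (List Int) :=
  let e_len := english.length
  let j_len := japanese.length
  if j_len = 0 then
    alignment_list ++ [alignment]
  else
    -- branch 1: alignment.append(index); recurse on japanese[1:]; alignment.pop(-1)  (pure: pass alignment ++ [index])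
    let al1 := if e_len ≤ j_len then
        alignment_dfs english (japanese.drop 1) index (alignment ++ [index]) alignment_list
      else alignment_list
    -- branch 2: alignment.append(index+1); recurse on english[1:], japanese[1:]; alignment.pop(-1)
    if 1 < e_len then
      alignment_dfs (english.drop 1) (japanese.drop 1) (index + 1) (alignment ++ [index + 1]) al1
    else al1
termination_by japanese.length
decreasing_by all_goals (simp; omega)

-- ===== PORT B =====
-- the bound 3^(j-1)+3^(j-1)+1 ≤ 3^j used by the loop's termination measure
theorem alignment_dfs_pow_lem (j : Nat) (h : j ≠ 0) : 3 ^ (j - 1) + 3 ^ (j - 1) + 1 ≤ 3 ^ j := by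
  have h1 : 1 ≤ 3 ^ (j - 1) := Nat.one_le_pow _ _ (by norm_num)
  calc 3 ^ (j - 1) + 3 ^ (j - 1) + 1 ≤ 3 ^ (j - 1) * 3 := by omega
    _ = 3 ^ j := by rw [← pow_succ]; congr 1; omega

-- the explicit-stack loop of Source B; a frame is (e_len, j_len, idx, snapshot); head of the list = top of the stack
def alignment_dfs_altLoop (stack : List (Nat × Nat × Int × List Int)) (alignment_list : List (List Int)) : List (List Int) :=
  match stack with
  | [] => alignment_list
  | (e, j, idx, align) :: rest =>
    if j = 0 then
      alignment_dfs_altLoop rest (alignment_list ++ [align])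
    else
      let rest1 := if 1 < e then (e - 1, j - 1, idx + 1, align ++ [idx + 1]) :: rest else rest
      let rest2 := if e ≤ j then (e, j - 1, idx, align ++ [idx]) :: rest1 else rest1
      alignment_dfs_altLoop rest2 alignment_list
termination_by (stack.map (fun f => 3 ^ f.2.1)).sum
decreasing_by
  · simp
  · have h3 := alignment_dfs_pow_lem j (by assumption)
    split <;> split <;> simp
    all_goals
      revert h3
      generalize (3:Nat) ^ (j - 1) = b
      generalize (3:Nat) ^ j = a
      intro h3
      omega

def alignment_dfs_alt (english : List Int) (japanese : List Int) (index : Int) (alignment : List Int) (alignment_list : List (List Int)) : List (List Int) :=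
  alignment_dfs_altLoop [(english.length, japanese.length, index, alignment)] alignment_list

-- ===== PRECONDITION & SPEC =====
def Spec_alignment_dfs (english : List Int) (japanese : List Int) (index : Int) (alignment : List Int) (alignment_list : List (List Int)) (out : List (List Int)) : Prop := out = alignment_dfs_alt english japanese index alignment alignment_list
instance (english : List Int) (japanese : List Int) (index : Int) (alignment : List Int) (alignment_list : List (List Int)) (out : List (List Int)) : Decidable (Spec_alignment_dfs english japanese index alignment alignment_list out) := by unfold Spec_alignment_dfs; infer_instance

-- ===== CLAIM (what is proved, stated in full; the proofs are below) =====
def Claim_equal_alignment_dfs : Prop := ∀ (english : List Int) (japanese : List Int) (index : Int) (alignment : List Int) (alignment_list : List (List Int)), Dom_alignment_dfs english japanese index alignment alignment_list → Spec_alignment_dfs english japanese index alignment alignment_list (alignment_dfs english japanese index alignment alignment_list)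

-- ===== LEMMAS AND PROOFS =====

-- processing one frame whose (e, j) are the lengths of E and J equals running A's recursion on (E, J) and then continuing with the rest of the stack
theorem altLoop_frame (J : List Int) : ∀ (E : List Int) (idx : Int) (al : List Int) (rest : List (Nat × Nat × Int × List Int)) (L : List (List Int)),
    alignment_dfs_altLoop ((E.length, J.length, idx, al) :: rest) L
      = alignment_dfs_altLoop rest (alignment_dfs E J idx al L) := by
  induction J with
  | nil =>
    intro E idx al rest L
    rw [alignment_dfs_altLoop, alignment_dfs]
    simp
  | cons x J' ih =>
    intro E idx al rest L
    rw [alignment_dfs_altLoop, alignment_dfs]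
    have hd : (x :: J').drop 1 = J' := rfl
    have hE : (E.length - 1 : Nat) = (E.drop 1).length := by simp
    by_cases he : 1 < E.length <;> by_cases hle : E.length ≤ J'.length + 1
    · simp only [List.length_cons, Nat.succ_ne_zero, ite_false, hd, hE, he, hle, ite_true,
        Nat.add_sub_cancel]
      rw [ih, ih]
    · simp only [List.length_cons, Nat.succ_ne_zero, ite_false, hd, hE, he, hle, ite_true,
        Nat.add_sub_cancel]
      rw [ih]
    · simp only [List.length_cons, Nat.succ_ne_zero, ite_false, hd, hE, he, hle, ite_true,
        Nat.add_sub_cancel]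
      rw [ih]
    · simp only [List.length_cons, Nat.succ_ne_zero, ite_false, hd, hE, he, hle, ite_true,
        Nat.add_sub_cancel]

-- ===== VERDICT (by name: the statement is the Claim_ definition above) =====
theorem alignment_dfs_spec : Claim_equal_alignment_dfs := by
  intro english japanese index alignment alignment_list _
  unfold Spec_alignment_dfs alignment_dfs_alt
  rw [altLoop_frame, alignment_dfs_altLoop]
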